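-- pv_equiv track=rewrite | github.com/randomparity/autosearch-dpdk | autoforge/perf/profile.py | fold_stacks
-- ===== SOURCE A (Python) =====
-- def fold_stacks(perf_script_output: str) -> dict[str, int]:
--     """Parse perf script output into folded stacks.
--
--     Args:
--         perf_script_output: Raw text from `perf script`.
--
--     Returns:
--         Dict mapping semicolon-delimited stack strings to sample counts.
--     """
--     stacks: dict[str, int] = {}
--     current_frames: list[str] = []
--
--     for line in perf_script_output.splitlines():
--         stripped = line.strip()
--
--         if not stripped:
--             # Blank line ends a record
--             if current_frames:
--                 # Frames are bottom-up from perf script; reverse for caller→callee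
--                 stack_key = ";".join(reversed(current_frames))
--                 stacks[stack_key] = stacks.get(stack_key, 0) + 1
--                 current_frames = []
--             continue
--
--         if stripped.startswith(("(", "#")):
--             continue
--
--         # Frame lines start with hex address
--         parts = stripped.split(None, 1)
--         if len(parts) >= 2 and _is_hex(parts[0]):
--             raw = parts[1].split("(")[0].strip()
--             # Strip offset like "+0x20" to get the bare symbol name
--             symbol = raw.split("+")[0] if raw else parts[0]
--             current_frames.append(symbol)
--
--     # Handle last record if no trailing blank line
--     if current_frames:
--         stack_key = ";".join(reversed(current_frames))
--         stacks[stack_key] = stacks.get(stack_key, 0) + 1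
--
--     return stacks
--
-- def _is_hex(s: str) -> bool:
--     """Check if a string looks like a hex address."""
--     try:
--         int(s, 16)
--     except ValueError:
--         return False
--     return True
-- ===== SOURCE B (Python) =====
-- def _is_hex(s: str) -> bool:
--     """Check if a string looks like a hex address."""
--     try:
--         int(s, 16)
--     except ValueError:
--         return False
--     return True
--
--
-- def _frame(line):
--     """Return the symbol of a frame line, or None if the line is not a frame."""
--     stripped = line.strip()
--     if stripped.startswith(("(", "#")):
--         return None
--     parts = stripped.split(None, 1)
--     if len(parts) < 2 or not _is_hex(parts[0]):
--         return None
--     raw = parts[1].split("(")[0].strip()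
--     return raw.split("+")[0] if raw else parts[0]
--
--
-- def fold_stacks(perf_script_output: str) -> dict[str, int]:
--     """Parse perf script output into folded stacks."""
--     # Partition the lines into records separated by blank (whitespace-only) lines.
--     records, rec = [], []
--     for line in perf_script_output.splitlines():
--         if line.strip():
--             rec.append(line)
--         else:
--             records.append(rec)
--             rec = []
--     records.append(rec)
--
--     stacks: dict[str, int] = {}
--     for rec in records:
--         frames = [f for f in map(_frame, rec) if f is not None]
--         if frames:
--             key = ";".join(reversed(frames))
--             stacks[key] = stacks.get(key, 0) + 1
--     return stacks
-- ===== Notes on version B (the rewrite author's own statement) =====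
-- stated objective: alternative
-- what changed: B first partitions the lines into blank-separated records, then maps each record's lines through a per-line frame extractor and counts the joined keys, removing A's streaming current_frames accumulator and its duplicated end-of-input flush.
import Mathlib
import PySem

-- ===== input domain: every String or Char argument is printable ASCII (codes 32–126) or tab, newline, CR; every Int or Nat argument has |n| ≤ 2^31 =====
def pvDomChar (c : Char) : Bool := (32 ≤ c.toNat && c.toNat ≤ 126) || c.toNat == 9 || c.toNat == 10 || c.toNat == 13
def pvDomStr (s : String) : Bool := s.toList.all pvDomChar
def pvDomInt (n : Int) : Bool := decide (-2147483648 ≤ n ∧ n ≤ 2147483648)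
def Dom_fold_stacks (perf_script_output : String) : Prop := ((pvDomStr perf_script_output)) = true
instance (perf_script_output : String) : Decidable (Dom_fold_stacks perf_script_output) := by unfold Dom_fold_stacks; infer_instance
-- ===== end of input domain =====

-- B partitions the lines into blank-separated records and counts per-record frame keys,
-- replacing A's streaming current-frames accumulator and its duplicated end-of-input flush
-- (alternative decomposition, same cost).


-- ===== PORT A =====
-- _is_hex: int(s, 16) succeeds ↔ ofStrBase? returns some (try/except ValueError)
def pv_is_hex (s : String) : Bool := (PySem.Int.ofStrBase? s 16).isSome

-- stks/cur are Python's stacks/current_frames; parts[0]/parts[1] are written with getD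
-- (the branch condition guarantees 2 ≤ parts.length); s.split(sep) with sep ≠ "" is
-- PySem.Str.split?, which is always `some` there, hence the `.getD []`.
def fold_stacks (perf_script_output : String) : List (String × Int) :=
  let st := (PySem.Str.splitlines perf_script_output).foldl
    (fun (st : PySem.Dict String Int × List String) line =>
      let stks := st.1
      let cur := st.2
      let stripped := PySem.Str.strip line
      if stripped = "" then
        if cur ≠ [] then
          let stack_key := PySem.Str.join ";" cur.reverse
          (stks.insert stack_key (stks.getD stack_key 0 + 1), ([] : List String))
        else (stks, cur)
      else if PySem.Str.startswith stripped "(" || PySem.Str.startswith stripped "#" then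
        (stks, cur)
      else
        let parts := PySem.Str.split₀Max stripped 1
        if 2 ≤ parts.length ∧ pv_is_hex (parts.getD 0 "") then
          let raw := PySem.Str.strip (((PySem.Str.split? (parts.getD 1 "") "(").getD []).getD 0 "")
          let symbol := if raw ≠ "" then ((PySem.Str.split? raw "+").getD []).getD 0 "" else parts.getD 0 ""
          (stks, cur ++ [symbol])
        else (stks, cur))
    (PySem.Dict.empty, ([] : List String))
  let stks :=
    if st.2 ≠ [] then
      let stack_key := PySem.Str.join ";" st.2.reverse
      st.1.insert stack_key (st.1.getD stack_key 0 + 1)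
    else st.1
  stks.items

-- ===== PORT B =====
-- _frame: the symbol of a frame line, or none if the line is not a frame
def pvFrame (line : String) : Option String :=
  let stripped := PySem.Str.strip line
  if PySem.Str.startswith stripped "(" || PySem.Str.startswith stripped "#" then none
  else
    let parts := PySem.Str.split₀Max stripped 1
    if parts.length < 2 ∨ pv_is_hex (parts.getD 0 "") = false then none
    else
      let raw := PySem.Str.strip (((PySem.Str.split? (parts.getD 1 "") "(").getD []).getD 0 "")
      some (if raw ≠ "" then ((PySem.Str.split? raw "+").getD []).getD 0 "" else parts.getD 0 "")

def fold_stacks_alt (perf_script_output : String) : List (String × Int) :=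
  -- partition the lines into records separated by blank (whitespace-only) lines
  let p := (PySem.Str.splitlines perf_script_output).foldl
    (fun (acc : List (List String) × List String) line =>
      if PySem.Str.strip line ≠ "" then (acc.1, acc.2 ++ [line])
      else (acc.1 ++ [acc.2], ([] : List String)))
    ([], [])
  ((p.1 ++ [p.2]).foldl
    (fun (stks : PySem.Dict String Int) record =>
      let frames := (record.map pvFrame).filterMap id
      if frames ≠ [] then
        let key := PySem.Str.join ";" frames.reverse
        stks.insert key (stks.getD key 0 + 1)
      else stks)
    PySem.Dict.empty).items

-- ===== PRECONDITION & SPEC =====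
def Spec_fold_stacks (perf_script_output : String) (out : List (String × Int)) : Prop := out = fold_stacks_alt perf_script_output
instance (perf_script_output : String) (out : List (String × Int)) : Decidable (Spec_fold_stacks perf_script_output out) := by unfold Spec_fold_stacks; infer_instance

-- ===== CLAIM (what is proved, stated in full; the proofs are below) =====
def Claim_equal_fold_stacks : Prop := ∀ (perf_script_output : String), Dom_fold_stacks perf_script_output → Spec_fold_stacks perf_script_output (fold_stacks perf_script_output)

-- ===== LEMMAS AND PROOFS =====

-- named copies of the two ports' loop bodies (definitionally equal to the inline lambdas)
def pvAstep (st : PySem.Dict String Int × List String) (line : String) :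
    PySem.Dict String Int × List String :=
  let stks := st.1
  let cur := st.2
  let stripped := PySem.Str.strip line
  if stripped = "" then
    if cur ≠ [] then
      let stack_key := PySem.Str.join ";" cur.reverse
      (stks.insert stack_key (stks.getD stack_key 0 + 1), ([] : List String))
    else (stks, cur)
  else if PySem.Str.startswith stripped "(" || PySem.Str.startswith stripped "#" then
    (stks, cur)
  else
    let parts := PySem.Str.split₀Max stripped 1
    if 2 ≤ parts.length ∧ pv_is_hex (parts.getD 0 "") then
      let raw := PySem.Str.strip (((PySem.Str.split? (parts.getD 1 "") "(").getD []).getD 0 "")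
      let symbol := if raw ≠ "" then ((PySem.Str.split? raw "+").getD []).getD 0 "" else parts.getD 0 ""
      (stks, cur ++ [symbol])
    else (stks, cur)

def pvFinishA (st : PySem.Dict String Int × List String) : PySem.Dict String Int :=
  if st.2 ≠ [] then
    let stack_key := PySem.Str.join ";" st.2.reverse
    st.1.insert stack_key (st.1.getD stack_key 0 + 1)
  else st.1

def pvPstep (acc : List (List String) × List String) (line : String) :
    List (List String) × List String :=
  if PySem.Str.strip line ≠ "" then (acc.1, acc.2 ++ [line])
  else (acc.1 ++ [acc.2], ([] : List String))

def pvCountStep (stks : PySem.Dict String Int) (record : List String) : PySem.Dict String Int :=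
  let frames := (record.map pvFrame).filterMap id
  if frames ≠ [] then
    let key := PySem.Str.join ";" frames.reverse
    stks.insert key (stks.getD key 0 + 1)
  else stks

def pvFramesOf (record : List String) : List String := (record.map pvFrame).filterMap id

lemma pvFramesOf_append (record : List String) (l : String) :
    pvFramesOf (record ++ [l]) = pvFramesOf record ++ (pvFrame l).toList := by
  unfold pvFramesOf
  rw [List.map_append, List.filterMap_append]
  rw [List.map_cons, List.map_nil, List.filterMap_cons, List.filterMap_nil]
  cases hf : pvFrame l <;> rfl

lemma pvFinishA_countStep (S : PySem.Dict String Int) (record : List String) :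
    pvFinishA (S, pvFramesOf record) = pvCountStep S record := rfl

lemma pvAstep_nonblank (st : PySem.Dict String Int × List String) (l : String)
    (h : PySem.Str.strip l ≠ "") :
    pvAstep st l = (st.1, st.2 ++ (pvFrame l).toList) := by
  unfold pvAstep pvFrame
  rw [if_neg h]
  by_cases h1 : (PySem.Str.startswith (PySem.Str.strip l) "(" || PySem.Str.startswith (PySem.Str.strip l) "#") = true
  · rw [if_pos h1, if_pos h1]; simp
  · by_cases h2 : 2 ≤ (PySem.Str.split₀Max (PySem.Str.strip l) 1).length ∧ pv_is_hex ((PySem.Str.split₀Max (PySem.Str.strip l) 1).getD 0 "") = true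
    · rw [if_neg h1, if_neg h1, if_pos h2, if_neg (by
        rintro (hl | hr)
        · omega
        · simp only [h2.2] at hr; exact Bool.noConfusion hr)]
      simp
    · rw [if_neg h1, if_neg h1, if_neg h2, if_pos (by
        rcases Decidable.not_and_iff_not_or_not.mp h2 with hl | hr
        · exact Or.inl (by omega)
        · exact Or.inr (by simp only [Bool.not_eq_true] at hr; exact hr))]
      simp

-- the loop invariant: A's streaming fold, flushed at the end, equals B's fold over the
-- partitioned records, with `record` the current partial record and `recs` those finished
lemma pvMain (lines : List String) (recs : List (List String)) (record : List String) :
    ((lines.foldl pvPstep (recs, record)).1 ++ [(lines.foldl pvPstep (recs, record)).2]).foldl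
        pvCountStep PySem.Dict.empty
      = pvFinishA (lines.foldl pvAstep (recs.foldl pvCountStep PySem.Dict.empty, pvFramesOf record)) := by
  induction lines generalizing recs record with
  | nil =>
    simp only [List.foldl_nil, List.foldl_append, List.foldl_cons]
    exact (pvFinishA_countStep _ _)
  | cons l ls ih =>
    by_cases h : PySem.Str.strip l = ""
    · have hp : pvPstep (recs, record) l = (recs ++ [record], []) := by simp [pvPstep, h]
      have ha : pvAstep (recs.foldl pvCountStep PySem.Dict.empty, pvFramesOf record) l
          = ((recs ++ [record]).foldl pvCountStep PySem.Dict.empty, pvFramesOf []) := by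
        rw [List.foldl_append, List.foldl_cons, List.foldl_nil, ← pvFinishA_countStep]
        generalize recs.foldl pvCountStep PySem.Dict.empty = S
        generalize hF : pvFramesOf record = F
        show pvAstep (S, F) l = (pvFinishA (S, F), pvFramesOf [])
        have hnil : pvFramesOf ([] : List String) = [] := rfl
        unfold pvAstep pvFinishA
        rw [hnil, if_pos h]
        by_cases hFn : F ≠ []
        · rw [if_pos hFn, if_pos hFn]
        · rw [if_neg hFn, if_neg hFn, not_not.mp hFn]
      rw [List.foldl_cons, List.foldl_cons, hp, ha]
      exact ih (recs ++ [record]) []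
    · have hp : pvPstep (recs, record) l = (recs, record ++ [l]) := by simp [pvPstep, h]
      have ha : pvAstep (recs.foldl pvCountStep PySem.Dict.empty, pvFramesOf record) l
          = (recs.foldl pvCountStep PySem.Dict.empty, pvFramesOf (record ++ [l])) := by
        rw [pvAstep_nonblank _ _ h, pvFramesOf_append]
      rw [List.foldl_cons, List.foldl_cons, hp, ha]
      exact ih recs (record ++ [l])

lemma fold_stacks_eq (p : String) :
    fold_stacks p
      = (pvFinishA ((PySem.Str.splitlines p).foldl pvAstep (PySem.Dict.empty, []))).items := rfl

lemma fold_stacks_alt_eq (p : String) :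
    fold_stacks_alt p
      = ((((PySem.Str.splitlines p).foldl pvPstep ([], [])).1
          ++ [((PySem.Str.splitlines p).foldl pvPstep ([], [])).2]).foldl pvCountStep
          PySem.Dict.empty).items := rfl

-- ===== VERDICT (by name: the statement is the Claim_ definition above) =====
theorem fold_stacks_spec : Claim_equal_fold_stacks := by
  intro p _
  unfold Spec_fold_stacks
  have hm := pvMain (PySem.Str.splitlines p) [] []
  rw [show List.foldl pvCountStep PySem.Dict.empty ([] : List (List String)) = PySem.Dict.empty from rfl,
      show pvFramesOf [] = ([] : List String) from rfl] at hm
  rw [fold_stacks_eq, fold_stacks_alt_eq, ← hm]
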